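-- pv_equiv track=rewrite | github.com/yennanliu/CS_basics | leetcode_python/Depth-First-Search/sentence-similarity-ii.py | areSentencesSimilarTwo
-- ===== SOURCE A (Python) =====
-- from collections import defaultdict
--
-- def areSentencesSimilarTwo(sentence1, sentence2, similarPairs):
--     # helper func
--     def dfs(w1, w2, visited):
--         for j in d[w2]:
--             if w1 == w2:
--                 return True
--             elif j not in visited:
--                 visited.add(j)
--                 if dfs(w1, j, visited):
--                     return True
--         return False
--
--     # edge case
--     if len(sentence1) != len(sentence2):
--         return False
--
--     d = defaultdict(list)
--     for a, b in similarPairs: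
--         d[a].append(b)
--         d[b].append(a)
--
--     for i in range(len(sentence1)):
--         visited =  set([sentence2[i]])
--         if sentence1[i] != sentence2[i] and not dfs(sentence1[i],  sentence2[i], visited):
--             return False
--     return True
-- ===== SOURCE B (Python) =====
-- def areSentencesSimilarTwo(sentence1, sentence2, similarPairs):
--     if len(sentence1) != len(sentence2):
--         return False
--     # build connected components of the word-pair graph once, by merging
--     comps = []
--     for a, b in similarPairs:
--         merged = {a, b}
--         rest = []
--         for c in comps:
--             if a in c or b in c:
--                 merged |= c
--             else:
--                 rest.append(c)
--         comps = rest + [merged]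
--     return all(x == y or any(x in c and y in c for c in comps)
--                for x, y in zip(sentence1, sentence2))
-- ===== Notes on version B (the rewrite author's own statement) =====
-- stated objective: alternative
-- what changed: A runs a recursive DFS with a fresh visited set for every word position; B precomputes the connected components of the word-pair graph once (merging components while scanning the pairs) and then answers each position by a component lookup.
import Mathlib
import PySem

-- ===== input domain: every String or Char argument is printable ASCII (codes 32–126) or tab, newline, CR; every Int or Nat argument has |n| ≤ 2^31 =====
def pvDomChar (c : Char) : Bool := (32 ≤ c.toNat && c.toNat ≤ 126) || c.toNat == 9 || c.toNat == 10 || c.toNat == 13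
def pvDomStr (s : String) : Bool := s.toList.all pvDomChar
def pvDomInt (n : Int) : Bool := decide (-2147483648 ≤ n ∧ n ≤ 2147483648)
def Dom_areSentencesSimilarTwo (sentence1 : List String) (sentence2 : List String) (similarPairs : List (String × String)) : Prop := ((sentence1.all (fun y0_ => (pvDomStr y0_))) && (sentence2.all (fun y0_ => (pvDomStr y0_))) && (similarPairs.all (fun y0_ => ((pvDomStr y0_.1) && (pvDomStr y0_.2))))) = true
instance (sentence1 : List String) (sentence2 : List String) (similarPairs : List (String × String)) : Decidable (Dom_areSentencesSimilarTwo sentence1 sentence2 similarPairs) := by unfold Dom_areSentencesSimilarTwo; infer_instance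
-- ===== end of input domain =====

-- B replaces A's per-word recursive DFS by a one-shot connected-component precomputation
-- (merging components while scanning the pairs); equivalence of the RETURN values is proved below.

-- ===== PORT A =====
-- the words occurring in the pairs (used only as a termination bound for the DFS port)
def pvUniv (similarPairs : List (String × String)) : List String :=
  similarPairs.flatMap (fun p => [p.1, p.2])

-- d = defaultdict(list); for a, b in similarPairs: d[a].append(b); d[b].append(a)
def pvBuildD (similarPairs : List (String × String)) : PySem.Dict String (List String) :=
  similarPairs.foldl
    (fun d p => (d.modify p.1 [] (· ++ [p.2])).modify p.2 [] (· ++ [p.1]))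
    PySem.Dict.empty

-- every edge of the pairs, both directions, in order
def pvFlat (similarPairs : List (String × String)) : List (String × String) :=
  similarPairs.flatMap (fun p => [(p.1, p.2), (p.2, p.1)])

-- the two modifies per pair are one modify per directed edge (needed to state pvAdj_char)
lemma pvBuildD_eq_flat (similarPairs : List (String × String)) :
    pvBuildD similarPairs =
      (pvFlat similarPairs).foldl (fun d p => d.modify p.1 [] (· ++ [p.2])) PySem.Dict.empty := by
  unfold pvBuildD pvFlat
  generalize PySem.Dict.empty = d
  induction similarPairs generalizing d with
  | nil => rfl
  | cons p ps ih => simp only [List.foldl_cons, List.flatMap_cons, List.foldl_append]; exact ih _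

-- adjacency of the built dict = directed edges of pvFlat (cited by the port's hypothesis args)
lemma pvAdj_char (similarPairs : List (String × String)) (k x : String) :
    x ∈ (pvBuildD similarPairs).getD k [] ↔ (k, x) ∈ pvFlat similarPairs := by
  rw [pvBuildD_eq_flat, PySem.Dict.getD_foldl_modify_append]
  have hempty : (PySem.Dict.empty (κ := String) (ν := List String)).getD k [] = [] := rfl
  rw [hempty, List.nil_append]
  simp only [List.mem_map, List.mem_filter, beq_iff_eq]
  constructor
  · rintro ⟨p, ⟨hp, hk⟩, hx⟩
    have hpe : p = (k, x) := by cases p; simp_all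
    rwa [hpe] at hp
  · intro h
    exact ⟨(k, x), ⟨h, rfl⟩, rfl⟩

-- cited by the port: neighbours live in pvUniv (termination bound)
lemma pvAdj_subset_univ (similarPairs : List (String × String)) :
    ∀ k x, x ∈ (pvBuildD similarPairs).getD k [] → x ∈ pvUniv similarPairs := by
  intro k x hx
  rw [pvAdj_char] at hx
  unfold pvFlat at hx
  unfold pvUniv
  simp only [List.mem_flatMap] at hx ⊢
  rcases hx with ⟨p, hp, h⟩
  refine ⟨p, hp, ?_⟩
  simp only [List.mem_cons, List.not_mem_nil, or_false, Prod.ext_iff] at h ⊢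
  rcases h with ⟨h1, h2⟩ | ⟨h1, h2⟩
  · exact Or.inr h2
  · exact Or.inl h2

-- termination helpers for pvGo
lemma pvFilter_len_le (univ v w : List String) (h : ∀ x ∈ v, x ∈ w) :
    (univ.filter (fun x => !decide (x ∈ w))).length ≤
      (univ.filter (fun x => !decide (x ∈ v))).length := by
  apply List.Sublist.length_le
  apply List.monotone_filter_right
  intro x hx
  simp only [Bool.not_eq_eq_eq_not, Bool.not_true, decide_eq_false_iff_not] at hx ⊢
  exact fun hm => hx (h x hm)

lemma pvFilter_len_lt (univ v : List String) (j : String) (hj : j ∈ univ) (hjv : j ∉ v) :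
    (univ.filter (fun x => !decide (x ∈ PySem.Set.add v j))).length <
      (univ.filter (fun x => !decide (x ∈ v))).length := by
  rw [PySem.Set.add_of_not_mem hjv]
  have hs : List.Sublist (univ.filter (fun x => !decide (x ∈ v ++ [j])))
      (univ.filter (fun x => !decide (x ∈ v))) := by
    apply List.monotone_filter_right
    intro x hx
    simp only [Bool.not_eq_eq_eq_not, Bool.not_true, decide_eq_false_iff_not,
      List.mem_append] at hx ⊢
    exact fun hm => hx (Or.inl hm)
  rcases Nat.lt_or_eq_of_le hs.length_le with h | h
  · exact h
  · exfalso
    have heq := hs.eq_of_length h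
    have hj1 : j ∈ univ.filter (fun x => !decide (x ∈ v)) := by
      simp [List.mem_filter, hj, hjv]
    rw [← heq] at hj1
    simp [List.mem_filter] at hj1

-- def dfs(w1, w2, visited): for j in d[w2]: …  — the loop over the (suffix of the) neighbour
-- list l of w2, threading the shared mutable `visited`; the subtype records that visited only
-- grows (needed for termination); hd/hl are termination bounds, not computation.
def pvGo (d : PySem.Dict String (List String)) (univ : List String)
    (hd : ∀ k x, x ∈ d.getD k [] → x ∈ univ)
    (w1 w2 : String) (l : List String) (v : PySem.Set String)
    (hl : ∀ x ∈ l, x ∈ univ) :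
    {p : Bool × PySem.Set String // ∀ x ∈ v, x ∈ p.2} :=
  match l with
  | [] => ⟨(false, v), fun _ hx => hx⟩
  | j :: rest =>
    if w1 = w2 then ⟨(true, v), fun _ hx => hx⟩
    else if hjv : j ∈ v then
      pvGo d univ hd w1 w2 rest v (fun x hx => hl x (List.mem_cons_of_mem _ hx))
    else
      let r1 := pvGo d univ hd w1 j (d.getD j []) (PySem.Set.add v j)
        (fun x hx => hd j x hx)
      if r1.val.1 then
        ⟨(true, r1.val.2), fun x hx => r1.2 x ((PySem.Set.mem_add _ _ _).2 (Or.inl hx))⟩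
      else
        let r2 := pvGo d univ hd w1 w2 rest r1.val.2
          (fun x hx => hl x (List.mem_cons_of_mem _ hx))
        ⟨r2.val, fun x hx => r2.2 x (r1.2 x ((PySem.Set.mem_add _ _ _).2 (Or.inl hx)))⟩
termination_by ((univ.filter (fun x => !decide (x ∈ v))).length, l.length)
decreasing_by
  · exact Prod.Lex.right _ (Nat.lt_succ_self _)
  · exact Prod.Lex.left _ _ (pvFilter_len_lt univ v j (hl j (List.mem_cons_self)) hjv)
  · rcases Nat.lt_or_eq_of_le
      (pvFilter_len_le univ v r1.val.2 (fun x hx => r1.2 x ((PySem.Set.mem_add _ _ _).2 (Or.inl hx)))) with h | h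
    · exact Prod.Lex.left _ _ h
    · rw [h]; exact Prod.Lex.right _ (Nat.lt_succ_self _)

def areSentencesSimilarTwo (sentence1 : List String) (sentence2 : List String)
    (similarPairs : List (String × String)) : Bool :=
  -- edge case
  if sentence1.length ≠ sentence2.length then false
  else
    let d := pvBuildD similarPairs
    -- for i in range(len(sentence1)): visited = {sentence2[i]};
    --   if sentence1[i] != sentence2[i] and not dfs(sentence1[i], sentence2[i], visited): return False
    (PySem.List.pyRange 0 (PySem.List.len sentence1) 1).all (fun i =>
      let w1 := PySem.List.pyGetD sentence1 i ""
      let w2 := PySem.List.pyGetD sentence2 i ""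
      (w1 == w2) ||
        (pvGo d (pvUniv similarPairs) (pvAdj_subset_univ similarPairs) w1 w2
          (d.getD w2 []) (PySem.Set.ofList [w2])
          (fun x hx => pvAdj_subset_univ similarPairs w2 x hx)).val.1)

-- ===== PORT B =====
-- merged = {a, b}; rest = []; for c in comps: if a in c or b in c: merged |= c else rest.append(c);
-- comps = rest + [merged]
def pvMerge (comps : List (PySem.Set String)) (a b : String) : List (PySem.Set String) :=
  let mr := comps.foldl
    (fun (mr : PySem.Set String × List (PySem.Set String)) c =>
      if a ∈ c ∨ b ∈ c then (PySem.Set.union mr.1 c, mr.2) else (mr.1, mr.2 ++ [c]))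
    (PySem.Set.ofList [a, b], [])
  mr.2 ++ [mr.1]

def areSentencesSimilarTwo_alt (sentence1 : List String) (sentence2 : List String)
    (similarPairs : List (String × String)) : Bool :=
  if sentence1.length ≠ sentence2.length then false
  else
    let comps := similarPairs.foldl (fun cs p => pvMerge cs p.1 p.2) []
    (sentence1.zip sentence2).all (fun p =>
      p.1 == p.2 || comps.any (fun c => p.1 ∈ c && p.2 ∈ c))

-- ===== PRECONDITION & SPEC =====
def Spec_areSentencesSimilarTwo (sentence1 : List String) (sentence2 : List String) (similarPairs : List (String × String)) (out : Bool) : Prop := out = areSentencesSimilarTwo_alt sentence1 sentence2 similarPairs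
instance (sentence1 : List String) (sentence2 : List String) (similarPairs : List (String × String)) (out : Bool) : Decidable (Spec_areSentencesSimilarTwo sentence1 sentence2 similarPairs out) := by unfold Spec_areSentencesSimilarTwo; infer_instance

-- ===== CLAIM (what is proved, stated in full; the proofs are below) =====
def Claim_equal_areSentencesSimilarTwo : Prop := ∀ (sentence1 : List String) (sentence2 : List String) (similarPairs : List (String × String)), Dom_areSentencesSimilarTwo sentence1 sentence2 similarPairs → Spec_areSentencesSimilarTwo sentence1 sentence2 similarPairs (areSentencesSimilarTwo sentence1 sentence2 similarPairs)

-- ===== LEMMAS AND PROOFS =====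

-- the undirected word graph of the pairs, and connectivity in it
def pvEdge (similarPairs : List (String × String)) (x y : String) : Prop :=
  (x, y) ∈ similarPairs ∨ (y, x) ∈ similarPairs

def pvReach (similarPairs : List (String × String)) : String → String → Prop :=
  Relation.ReflTransGen (pvEdge similarPairs)

lemma pvEdge_symm (similarPairs : List (String × String)) {x y : String}
    (h : pvEdge similarPairs x y) : pvEdge similarPairs y x := h.symm

lemma pvReach_symm (similarPairs : List (String × String)) {x y : String}
    (h : pvReach similarPairs x y) : pvReach similarPairs y x :=
  Relation.ReflTransGen.symmetric (fun _ _ => pvEdge_symm similarPairs) h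

lemma pvFlat_iff (similarPairs : List (String × String)) (k x : String) :
    (k, x) ∈ pvFlat similarPairs ↔ pvEdge similarPairs k x := by
  unfold pvFlat pvEdge
  simp only [List.mem_flatMap, List.mem_cons, List.not_mem_nil, or_false, Prod.ext_iff]
  constructor
  · rintro ⟨p, hp, h | h⟩
    · exact Or.inl (by obtain ⟨h1, h2⟩ := h; cases p; simp_all)
    · exact Or.inr (by obtain ⟨h1, h2⟩ := h; cases p; simp_all)
  · rintro (h | h)
    · exact ⟨(k, x), h, Or.inl ⟨rfl, rfl⟩⟩
    · exact ⟨(x, k), h, Or.inr ⟨rfl, rfl⟩⟩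

lemma pvAdj_iff (similarPairs : List (String × String)) (k x : String) :
    x ∈ (pvBuildD similarPairs).getD k [] ↔ pvEdge similarPairs k x := by
  rw [pvAdj_char, pvFlat_iff]

lemma pvAdj_symm (similarPairs : List (String × String)) {k x : String}
    (h : x ∈ (pvBuildD similarPairs).getD k []) :
    k ∈ (pvBuildD similarPairs).getD x [] := by
  rw [pvAdj_iff] at h ⊢; exact pvEdge_symm _ h

-- dfs on a nonempty neighbour list with w1 = w2 answers true at once
lemma pvGo_self (d : PySem.Dict String (List String)) (univ : List String)
    (hd : ∀ k x, x ∈ d.getD k [] → x ∈ univ) (w1 : String)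
    (y : String) (l' : List String) (v : PySem.Set String)
    (hl : ∀ x ∈ y :: l', x ∈ univ) :
    (pvGo d univ hd w1 w1 (y :: l') v hl).val.1 = true := by
  rw [pvGo]
  simp

-- dfs soundness: a true answer means w1 is reachable from w2
lemma pvGo_sound (similarPairs : List (String × String))
    (univ : List String) (hd : ∀ k x, x ∈ (pvBuildD similarPairs).getD k [] → x ∈ univ)
    (w1 w2 : String) (l : List String) (v : PySem.Set String)
    (hl : ∀ x ∈ l, x ∈ univ)
    (hl2 : ∀ x ∈ l, x ∈ (pvBuildD similarPairs).getD w2 [])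
    (ht : (pvGo (pvBuildD similarPairs) univ hd w1 w2 l v hl).val.1 = true) :
    pvReach similarPairs w2 w1 := by
  revert hl2 ht
  fun_induction pvGo with
  | case1 =>
    intro _ ht
    simp at ht
  | case2 =>
    intro _ _
    exact Relation.ReflTransGen.refl
  | case3 w2 v j rest hl1 hne hjv hl2x ih =>
    intro hl2 ht
    exact ih (fun x hx => hl2 x (List.mem_cons_of_mem _ hx)) ht
  | case4 w2 v j rest hl1 hne hjv r1 hr1 hl2x ih =>
    intro hl2 _
    have hreach_j : pvReach similarPairs j w1 := ih (fun x hx => hx) hr1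
    have hedge : pvEdge similarPairs w2 j :=
      (pvAdj_iff similarPairs w2 j).1 (hl2 j (List.mem_cons_self))
    exact Relation.ReflTransGen.head hedge hreach_j
  | case5 w2 v j rest hl1 hne hjv r1 hr1 r2 hl2x ih3 ih2 ih1 =>
    intro hl2 ht
    exact ih2 (fun x hx => hl2 x (List.mem_cons_of_mem _ hx)) ht

-- a call with w1 = w2 and a nonempty neighbour list cannot answer false
lemma pvGo_self_false_elim (d : PySem.Dict String (List String)) (univ : List String)
    (hd : ∀ k x, x ∈ d.getD k [] → x ∈ univ) (w1 : String)
    (l : List String) (v : PySem.Set String) (hl : ∀ x ∈ l, x ∈ univ)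
    (hne : l ≠ []) (h : (pvGo d univ hd w1 w1 l v hl).val.1 = false) : False := by
  cases l with
  | nil => exact hne rfl
  | cons y l' =>
    rw [pvGo_self] at h
    exact Bool.true_eq_false.mp h

-- dfs false invariant: the final visited set contains l, is adjacency-closed off the initial
-- visited set, and never picked up w1
lemma pvGo_false (similarPairs : List (String × String))
    (univ : List String) (hd : ∀ k x, x ∈ (pvBuildD similarPairs).getD k [] → x ∈ univ)
    (w1 w2 : String) (l : List String) (v : PySem.Set String)
    (hl : ∀ x ∈ l, x ∈ univ)
    (hl2 : ∀ x ∈ l, x ∈ (pvBuildD similarPairs).getD w2 [])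
    (hf : (pvGo (pvBuildD similarPairs) univ hd w1 w2 l v hl).val.1 = false) :
    (∀ x ∈ l, x ∈ (pvGo (pvBuildD similarPairs) univ hd w1 w2 l v hl).val.2) ∧
    (∀ x, x ∈ (pvGo (pvBuildD similarPairs) univ hd w1 w2 l v hl).val.2 → x ∉ v →
      (∀ y ∈ (pvBuildD similarPairs).getD x [],
        y ∈ (pvGo (pvBuildD similarPairs) univ hd w1 w2 l v hl).val.2) ∧ x ≠ w1) := by
  revert hl2 hf
  fun_induction pvGo with
  | case1 =>
    intro _ _
    exact ⟨fun x hx => absurd hx (List.not_mem_nil), fun x hx hxv => absurd hx hxv⟩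
  | case2 =>
    intro _ hf
    simp at hf
  | case3 w2 v j rest hl1 hne hjv hl2x ih =>
    intro hl2 hf
    obtain ⟨hb, hc⟩ := ih (fun x hx => hl2 x (List.mem_cons_of_mem _ hx)) hf
    refine ⟨?_, hc⟩
    intro x hx
    rcases List.mem_cons.1 hx with rfl | hx
    · exact (pvGo _ _ _ w1 w2 rest v _).2 x hjv
    · exact hb x hx
  | case4 w2 v j rest hl1 hne hjv r1 hr1 hl2x ih =>
    intro _ hf
    simp at hf
  | case5 w2 v j rest hl1 hne hjv r1 hr1 r2 hl2x ih3 ih2 ih1 =>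
    intro hl2 hf
    have hr1f : r1.val.1 = false := by
      rcases Bool.eq_false_or_eq_true r1.val.1 with h | h
      · exact absurd h hr1
      · exact h
    obtain ⟨hb1, hc1⟩ := ih3 (fun x hx => hx) hr1f
    have hf2 : r2.val.1 = false := hf
    obtain ⟨hb2, hc2⟩ := ih2 (fun x hx => hl2 x (List.mem_cons_of_mem _ hx)) hf2
    have hsub12 : ∀ x ∈ r1.val.2, x ∈ r2.val.2 := fun x hx => r2.2 x hx
    have hjne : j ≠ w1 := by
      intro hjw
      have hw2adj : w2 ∈ (pvBuildD similarPairs).getD j [] :=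
        pvAdj_symm similarPairs (hl2 j (List.mem_cons_self))
      subst hjw
      exact pvGo_self_false_elim (pvBuildD similarPairs) univ hd j
        ((pvBuildD similarPairs).getD j []) (PySem.Set.add v j) _
        (List.ne_nil_of_mem hw2adj) hr1f
    refine ⟨?_, ?_⟩
    · intro x hx
      rcases List.mem_cons.1 hx with rfl | hx
      · exact hsub12 x (r1.2 x ((PySem.Set.mem_add _ _ _).2 (Or.inr rfl)))
      · exact hb2 x hx
    · intro x hx hxv
      by_cases hx1 : x ∈ r1.val.2
      · by_cases hxa : x ∈ PySem.Set.add v j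
        · have hxj : x = j := by
            rcases (PySem.Set.mem_add _ _ _).1 hxa with h | h
            · exact absurd h hxv
            · exact h
          subst hxj
          exact ⟨fun y hy => hsub12 y (hb1 y hy), hjne⟩
        · obtain ⟨hcl, hne1⟩ := hc1 x hx1 hxa
          exact ⟨fun y hy => hsub12 y (hcl y hy), hne1⟩
      · exact hc2 x hx hx1

-- the top-level dfs call decides reachability (w1 ≠ w2)
lemma pvDfs_iff (similarPairs : List (String × String)) (w1 w2 : String) (hne : w1 ≠ w2) :
    (pvGo (pvBuildD similarPairs) (pvUniv similarPairs) (pvAdj_subset_univ similarPairs)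
        w1 w2 ((pvBuildD similarPairs).getD w2 []) (PySem.Set.ofList [w2])
        (fun x hx => pvAdj_subset_univ similarPairs w2 x hx)).val.1 = true ↔
      pvReach similarPairs w2 w1 := by
  constructor
  · intro ht
    exact pvGo_sound similarPairs _ _ w1 w2 _ _ _ (fun x hx => hx) ht
  · intro hreach
    by_contra hf'
    have hf : (pvGo (pvBuildD similarPairs) (pvUniv similarPairs)
        (pvAdj_subset_univ similarPairs) w1 w2 ((pvBuildD similarPairs).getD w2 [])
        (PySem.Set.ofList [w2])
        (fun x hx => pvAdj_subset_univ similarPairs w2 x hx)).val.1 = false := by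
      rcases Bool.eq_false_or_eq_true (pvGo (pvBuildD similarPairs) (pvUniv similarPairs)
        (pvAdj_subset_univ similarPairs) w1 w2 ((pvBuildD similarPairs).getD w2 [])
        (PySem.Set.ofList [w2])
        (fun x hx => pvAdj_subset_univ similarPairs w2 x hx)).val.1 with h | h
      · exact absurd h hf'
      · exact h
    obtain ⟨hb, hc⟩ := pvGo_false similarPairs _ _ w1 w2 _ _ _ (fun x hx => hx) hf
    have hv0 : w2 ∈ (pvGo (pvBuildD similarPairs) (pvUniv similarPairs)
        (pvAdj_subset_univ similarPairs) w1 w2 ((pvBuildD similarPairs).getD w2 [])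
        (PySem.Set.ofList [w2])
        (fun x hx => pvAdj_subset_univ similarPairs w2 x hx)).val.2 :=
      (pvGo _ _ _ w1 w2 _ _ _).2 w2 (by simp [PySem.Set.mem_ofList])
    have hall : ∀ z, pvReach similarPairs w2 z →
        z ∈ (pvGo (pvBuildD similarPairs) (pvUniv similarPairs)
          (pvAdj_subset_univ similarPairs) w1 w2 ((pvBuildD similarPairs).getD w2 [])
          (PySem.Set.ofList [w2])
          (fun x hx => pvAdj_subset_univ similarPairs w2 x hx)).val.2 := by
      intro z hz
      induction hz with
      | refl => exact hv0
      | @tail m z' hm hmz ihz =>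
        have hadj : z' ∈ (pvBuildD similarPairs).getD m [] := (pvAdj_iff _ m z').2 hmz
        by_cases hmw : m = w2
        · subst hmw
          exact hb z' hadj
        · have hmnotv : m ∉ PySem.Set.ofList [w2] := by
            simp only [PySem.Set.mem_ofList, List.mem_singleton]
            exact hmw
          exact (hc m ihz hmnotv).1 z' hadj
    have hw1nv : w1 ∉ PySem.Set.ofList [w2] := by
      simp only [PySem.Set.mem_ofList, List.mem_singleton]
      exact hne
    exact (hc w1 (hall w1 hreach) hw1nv).2 rfl

-- ---- B side ----
def pvComps (similarPairs : List (String × String)) : List (PySem.Set String) :=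
  similarPairs.foldl (fun cs p => pvMerge cs p.1 p.2) []

lemma pvMergeFold_eq (a b : String) (comps : List (PySem.Set String))
    (m0 : PySem.Set String) (r0 : List (PySem.Set String)) :
    comps.foldl
        (fun (mr : PySem.Set String × List (PySem.Set String)) c =>
          if a ∈ c ∨ b ∈ c then (PySem.Set.union mr.1 c, mr.2) else (mr.1, mr.2 ++ [c]))
        (m0, r0) =
      (comps.foldl (fun m c => if a ∈ c ∨ b ∈ c then PySem.Set.union m c else m) m0,
        r0 ++ comps.filter (fun c => !(decide (a ∈ c) || decide (b ∈ c)))) := by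
  induction comps generalizing m0 r0 with
  | nil => simp
  | cons c cs ih =>
    simp only [List.foldl_cons, List.filter_cons]
    by_cases hc : a ∈ c ∨ b ∈ c
    · have hb : (!(decide (a ∈ c) || decide (b ∈ c))) = false := by
        rcases hc with h | h <;> simp [h]
      rw [if_pos hc, if_pos hc, ih, hb]
      simp
    · have hb : (!(decide (a ∈ c) || decide (b ∈ c))) = true := by
        push Not at hc
        simp [hc.1, hc.2]
      rw [if_neg hc, if_neg hc, ih, hb]
      simp

lemma pvMerge_spec (comps : List (PySem.Set String)) (a b : String) :
    pvMerge comps a b =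
      comps.filter (fun c => !(decide (a ∈ c) || decide (b ∈ c))) ++
        [comps.foldl (fun m c => if a ∈ c ∨ b ∈ c then PySem.Set.union m c else m)
          (PySem.Set.ofList [a, b])] := by
  unfold pvMerge
  rw [pvMergeFold_eq]
  simp

lemma pvMem_mergedFold (comps : List (PySem.Set String)) (a b x : String) :
    x ∈ comps.foldl (fun m c => if a ∈ c ∨ b ∈ c then PySem.Set.union m c else m)
        (PySem.Set.ofList [a, b]) ↔
      x = a ∨ x = b ∨ ∃ c ∈ comps, (a ∈ c ∨ b ∈ c) ∧ x ∈ c := by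
  have base : ∀ (m0 : PySem.Set String),
      x ∈ comps.foldl (fun m c => if a ∈ c ∨ b ∈ c then PySem.Set.union m c else m) m0 ↔
        x ∈ m0 ∨ ∃ c ∈ comps, (a ∈ c ∨ b ∈ c) ∧ x ∈ c := by
    induction comps with
    | nil => simp
    | cons c cs ih =>
      intro m0
      simp only [List.foldl_cons]
      by_cases hc : a ∈ c ∨ b ∈ c
      · rw [if_pos hc, ih]
        simp only [PySem.Set.mem_union, List.mem_cons]
        constructor
        · rintro ((h | h) | ⟨c', hc', hsel, hx⟩)
          · exact Or.inl h
          · exact Or.inr ⟨c, Or.inl rfl, hc, h⟩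
          · exact Or.inr ⟨c', Or.inr hc', hsel, hx⟩
        · rintro (h | ⟨c', hc', hsel, hx⟩)
          · exact Or.inl (Or.inl h)
          · rcases hc' with rfl | hc'
            · exact Or.inl (Or.inr hx)
            · exact Or.inr ⟨c', hc', hsel, hx⟩
      · rw [if_neg hc, ih]
        simp only [List.mem_cons]
        constructor
        · rintro (h | ⟨c', hc', hsel, hx⟩)
          · exact Or.inl h
          · exact Or.inr ⟨c', Or.inr hc', hsel, hx⟩
        · rintro (h | ⟨c', hc', hsel, hx⟩)
          · exact Or.inl h
          · rcases hc' with rfl | hc'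
            · exact absurd hsel hc
            · exact Or.inr ⟨c', hc', hsel, hx⟩
  rw [base]
  simp only [PySem.Set.mem_ofList, List.mem_cons, List.not_mem_nil, or_false, or_assoc]

-- one merge step preserves the component invariants
lemma pvMerge_inv (PAIRS : List (String × String)) (a b : String)
    (hab : pvEdge PAIRS a b) (comps0 : List (PySem.Set String))
    (hconn : ∀ c ∈ comps0, ∀ x ∈ c, ∀ y ∈ c, pvReach PAIRS x y)
    (hdis : comps0.Pairwise (fun c c' => ∀ x, x ∈ c → x ∉ c')) :
    (∀ c ∈ pvMerge comps0 a b, ∀ x ∈ c, ∀ y ∈ c, pvReach PAIRS x y) ∧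
    (pvMerge comps0 a b).Pairwise (fun c c' => ∀ x, x ∈ c → x ∉ c') ∧
    (∀ x y, (∃ c ∈ comps0, x ∈ c ∧ y ∈ c) → ∃ c ∈ pvMerge comps0 a b, x ∈ c ∧ y ∈ c) ∧
    (∃ c ∈ pvMerge comps0 a b, a ∈ c ∧ b ∈ c) := by
  have hsymR : Symmetric (fun (c c' : PySem.Set String) => ∀ x, x ∈ c → x ∉ c') := by
    intro c c' h x hx hx'
    exact h x hx' hx
  set merged := comps0.foldl
      (fun m c => if a ∈ c ∨ b ∈ c then PySem.Set.union m c else m)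
      (PySem.Set.ofList [a, b]) with hmerged
  have hmem : ∀ x, x ∈ merged ↔
      x = a ∨ x = b ∨ ∃ c ∈ comps0, (a ∈ c ∨ b ∈ c) ∧ x ∈ c := fun x =>
    pvMem_mergedFold comps0 a b x
  have hreach_a : ∀ x ∈ merged, pvReach PAIRS x a := by
    intro x hx
    rcases (hmem x).1 hx with rfl | rfl | ⟨c, hc, hsel, hxc⟩
    · exact Relation.ReflTransGen.refl
    · exact Relation.ReflTransGen.single (pvEdge_symm _ hab)
    · rcases hsel with ha | hb
      · exact hconn c hc x hxc a ha
      · exact Relation.ReflTransGen.trans (hconn c hc x hxc b hb)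
          (Relation.ReflTransGen.single (pvEdge_symm _ hab))
  have hmspec := pvMerge_spec comps0 a b
  refine ⟨?_, ?_, ?_, ?_⟩
  · intro c hc x hx y hy
    rw [hmspec, List.mem_append] at hc
    rcases hc with hc | hc
    · exact hconn c (List.mem_of_mem_filter hc) x hx y hy
    · rw [List.mem_singleton] at hc
      subst hc
      exact Relation.ReflTransGen.trans (hreach_a x hx) (pvReach_symm _ (hreach_a y hy))
  · rw [hmspec]
    rw [List.pairwise_append]
    refine ⟨hdis.filter _, List.pairwise_singleton _ _, ?_⟩
    intro c' hc' c'' hc'' x hxc'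
    rw [List.mem_singleton] at hc''
    subst hc''
    rw [List.mem_filter] at hc'
    obtain ⟨hc0, hbool⟩ := hc'
    have hna : a ∉ c' ∧ b ∉ c' := by
      constructor <;> intro hm <;> simp [hm] at hbool
    intro hxm
    rcases (hmem x).1 hxm with rfl | rfl | ⟨c, hc, hsel, hxc⟩
    · exact hna.1 hxc'
    · exact hna.2 hxc'
    · by_cases hcc : c = c'
      · subst hcc
        rcases hsel with h | h
        · exact hna.1 h
        · exact hna.2 h
      · exact hdis.forall hsymR hc hc0 (Ne.symm (fun h => hcc h.symm)) x hxc hxc'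
  · intro x y ⟨c0, hc0, hx, hy⟩
    by_cases hsel : a ∈ c0 ∨ b ∈ c0
    · refine ⟨merged, ?_, (hmem x).2 (Or.inr (Or.inr ⟨c0, hc0, hsel, hx⟩)),
        (hmem y).2 (Or.inr (Or.inr ⟨c0, hc0, hsel, hy⟩))⟩
      rw [hmspec, List.mem_append, List.mem_singleton]
      exact Or.inr rfl
    · refine ⟨c0, ?_, hx, hy⟩
      rw [hmspec, List.mem_append]
      left
      rw [List.mem_filter]
      push Not at hsel
      refine ⟨hc0, by simp [hsel.1, hsel.2]⟩
  · refine ⟨merged, ?_, (hmem a).2 (Or.inl rfl), (hmem b).2 (Or.inr (Or.inl rfl))⟩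
    rw [hmspec, List.mem_append, List.mem_singleton]
    exact Or.inr rfl

-- the fold invariant: components are connected, pairwise disjoint, and cover every processed pair
lemma pvFold_inv (PAIRS : List (String × String)) :
    ∀ (ps : List (String × String)) (comps0 : List (PySem.Set String)),
    (∀ p ∈ ps, pvEdge PAIRS p.1 p.2) →
    (∀ c ∈ comps0, ∀ x ∈ c, ∀ y ∈ c, pvReach PAIRS x y) →
    comps0.Pairwise (fun c c' => ∀ x, x ∈ c → x ∉ c') →
    (∀ c ∈ ps.foldl (fun cs p => pvMerge cs p.1 p.2) comps0, ∀ x ∈ c, ∀ y ∈ c,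
        pvReach PAIRS x y) ∧
    (ps.foldl (fun cs p => pvMerge cs p.1 p.2) comps0).Pairwise
        (fun c c' => ∀ x, x ∈ c → x ∉ c') ∧
    (∀ x y, ((∃ c ∈ comps0, x ∈ c ∧ y ∈ c) ∨ (x, y) ∈ ps) →
      ∃ c ∈ ps.foldl (fun cs p => pvMerge cs p.1 p.2) comps0, x ∈ c ∧ y ∈ c) := by
  intro ps
  induction ps with
  | nil =>
    intro comps0 _ hconn hdis
    exact ⟨hconn, hdis, fun x y h => by
      rcases h with h | h
      · exact h
      · simp at h⟩
  | cons p ps ih =>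
    intro comps0 hedges hconn hdis
    obtain ⟨mconn, mdis, mcov, mpair⟩ :=
      pvMerge_inv PAIRS p.1 p.2 (hedges p (List.mem_cons_self)) comps0 hconn hdis
    simp only [List.foldl_cons]
    obtain ⟨fconn, fdis, fcov⟩ := ih (pvMerge comps0 p.1 p.2)
      (fun q hq => hedges q (List.mem_cons_of_mem _ hq)) mconn mdis
    refine ⟨fconn, fdis, ?_⟩
    intro x y h
    rcases h with h | h
    · exact fcov x y (Or.inl (mcov x y h))
    · rcases List.mem_cons.1 h with rfl | h
      · exact fcov x y (Or.inl mpair)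
      · exact fcov x y (Or.inr h)

lemma pvComps_conn (similarPairs : List (String × String)) :
    ∀ c ∈ pvComps similarPairs, ∀ x ∈ c, ∀ y ∈ c, pvReach similarPairs x y :=
  (pvFold_inv similarPairs similarPairs []
    (fun p hp => Or.inl (by cases p; exact hp)) (by simp) (by simp)).1

lemma pvReach_to_comp (similarPairs : List (String × String)) (x y : String)
    (h : pvReach similarPairs x y) :
    x = y ∨ ∃ c ∈ pvComps similarPairs, x ∈ c ∧ y ∈ c := by
  obtain ⟨_, hdis, hcov⟩ := pvFold_inv similarPairs similarPairs []
    (fun p hp => Or.inl (by cases p; exact hp)) (by simp) (by simp)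
  have hsymR : Symmetric (fun (c c' : PySem.Set String) => ∀ x, x ∈ c → x ∉ c') := by
    intro c c' h x hx hx'
    exact h x hx' hx
  have hsame : ∀ c ∈ pvComps similarPairs, ∀ c' ∈ pvComps similarPairs,
      ∀ z, z ∈ c → z ∈ c' → c = c' := by
    intro c hc c' hc' z hz hz'
    by_contra hne
    exact hdis.forall hsymR hc hc' hne z hz hz'
  have hpair : ∀ u v : String, pvEdge similarPairs u v →
      ∃ c ∈ pvComps similarPairs, u ∈ c ∧ v ∈ c := by
    intro u v huv
    rcases huv with h | h
    · exact hcov u v (Or.inr h)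
    · obtain ⟨c, hc, h1, h2⟩ := hcov v u (Or.inr h)
      exact ⟨c, hc, h2, h1⟩
  induction h with
  | refl => exact Or.inl rfl
  | @tail m y' hxm hmy ih =>
    obtain ⟨c', hc', hm, hy⟩ := hpair m y' hmy
    rcases ih with rfl | ⟨c, hc, hxc, hmc⟩
    · exact Or.inr ⟨c', hc', hm, hy⟩
    · have := hsame c hc c' hc' m hmc hm
      subst this
      exact Or.inr ⟨c, hc, hxc, hy⟩

-- ---- assembly ----
lemma pvPoint (similarPairs : List (String × String)) (w1 w2 : String) :
    ((w1 == w2) ||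
      (pvGo (pvBuildD similarPairs) (pvUniv similarPairs) (pvAdj_subset_univ similarPairs)
        w1 w2 ((pvBuildD similarPairs).getD w2 []) (PySem.Set.ofList [w2])
        (fun x hx => pvAdj_subset_univ similarPairs w2 x hx)).val.1) =
    ((w1 == w2) || (pvComps similarPairs).any (fun c => w1 ∈ c && w2 ∈ c)) := by
  by_cases h : w1 = w2
  · subst h
    simp
  · have hbe : (w1 == w2) = false := by simp [h]
    rw [hbe]
    simp only [Bool.false_or]
    rw [Bool.eq_iff_iff]
    rw [pvDfs_iff similarPairs w1 w2 h]
    constructor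
    · intro hr
      rcases pvReach_to_comp similarPairs w1 w2 (pvReach_symm _ hr) with rfl | ⟨c, hc, h1, h2⟩
      · exact absurd rfl h
      · rw [List.any_eq_true]
        exact ⟨c, hc, by simp [h1, h2]⟩
    · intro ha
      rw [List.any_eq_true] at ha
      obtain ⟨c, hc, hx⟩ := ha
      have h1 : w1 ∈ c ∧ w2 ∈ c := by simpa using hx
      exact pvReach_symm _ (pvComps_conn similarPairs c hc w1 h1.1 w2 h1.2)

lemma pvRange_all_zip (s1 s2 : List String) (h : s1.length = s2.length)
    (f : String → String → Bool) :
    (PySem.List.pyRange 0 (PySem.List.len s1) 1).all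
        (fun i => f (PySem.List.pyGetD s1 i "") (PySem.List.pyGetD s2 i "")) =
      (s1.zip s2).all (fun p => f p.1 p.2) := by
  rw [Bool.eq_iff_iff, List.all_eq_true, List.all_eq_true]
  constructor
  · intro H p hp
    rw [List.mem_iff_getElem] at hp
    obtain ⟨k, hk, rfl⟩ := hp
    rw [List.getElem_zip]
    have hk1 : k < s1.length := by
      rw [List.length_zip] at hk
      omega
    have hk2 : k < s2.length := by omega
    have hmem : (k : Int) ∈ PySem.List.pyRange 0 (PySem.List.len s1) 1 := by
      rw [PySem.List.mem_pyRange_one]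
      simp only [PySem.List.len_eq]
      omega
    have := H (k : Int) hmem
    rw [PySem.List.pyGetD_natCast, PySem.List.pyGetD_natCast,
      List.getD_eq_getElem _ _ hk1, List.getD_eq_getElem _ _ hk2] at this
    exact this
  · intro H i hi
    rw [PySem.List.mem_pyRange_one] at hi
    obtain ⟨h0, hlt⟩ := hi
    simp only [PySem.List.len_eq] at hlt
    have hk1 : i.toNat < s1.length := by omega
    have hk2 : i.toNat < s2.length := by omega
    rw [PySem.List.pyGetD_eq_getElem s1 "" h0 (by omega),
      PySem.List.pyGetD_eq_getElem s2 "" h0 (by omega)]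
    have hz : (s1[i.toNat], s2[i.toNat]) ∈ s1.zip s2 := by
      rw [List.mem_iff_getElem]
      refine ⟨i.toNat, by rw [List.length_zip]; omega, ?_⟩
      rw [List.getElem_zip]
    exact H _ hz

-- ===== VERDICT (by name: the statement is the Claim_ definition above) =====
theorem areSentencesSimilarTwo_spec : Claim_equal_areSentencesSimilarTwo := by
  intro s1 s2 ps _dom
  unfold Spec_areSentencesSimilarTwo areSentencesSimilarTwo areSentencesSimilarTwo_alt
  by_cases hlen : s1.length = s2.length
  · simp only [hlen, ne_eq, not_true_eq_false, if_false]
    rw [pvRange_all_zip s1 s2 hlen (fun w1 w2 => (w1 == w2) ||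
      (pvGo (pvBuildD ps) (pvUniv ps) (pvAdj_subset_univ ps) w1 w2
        ((pvBuildD ps).getD w2 []) (PySem.Set.ofList [w2])
        (fun x hx => pvAdj_subset_univ ps w2 x hx)).val.1)]
    exact congrArg (List.all _) (funext fun p => pvPoint ps p.1 p.2)
  · simp [hlen]
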